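-- pv_equiv track=rewrite | github.com/adityaASU/SWMProject | src/evaluation/metrics.py | _extract_clause
-- ===== SOURCE A (Python) =====
-- def _extract_clause(sql: str, clause: str) -> str:
--     """Heuristically extract a clause from normalised SQL."""
--     all_keywords = [
--         "select", "from", "join", "where", "group by", "having", "order by", "limit"
--     ]
--     try:
--         idx = sql.find(clause)
--         if idx == -1:
--             return ""
--         end = len(sql)
--         for kw in all_keywords:
--             if kw == clause:
--                 continue
--             pos = sql.find(kw, idx + len(clause))
--             if pos != -1 and pos < end:
--                 end = pos
--         return sql[idx:end].strip()
--     except Exception: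
--         return ""
-- ===== SOURCE B (Python) =====
-- def _extract_clause(sql: str, clause: str) -> str:
--     """Heuristically extract a clause from normalised SQL."""
--     all_keywords = [
--         "select", "from", "join", "where", "group by", "having", "order by", "limit"
--     ]
--     try:
--         idx = sql.find(clause)
--         if idx == -1:
--             return ""
--         end = len(sql)
--         for p in range(idx + len(clause), len(sql)):
--             if any(sql.startswith(kw, p) for kw in all_keywords if kw != clause):
--                 end = p
--                 break
--         return sql[idx:end].strip()
--     except Exception:
--         return ""
-- ===== Notes on version B (the rewrite author's own statement) =====
-- stated objective: alternative
-- what changed: Instead of A's eight separate sql.find scans (one per keyword) combined with a running minimum, B makes a single left-to-right scan from the end of the clause keyword and stops at the first position where any other keyword starts.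
import Mathlib
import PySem

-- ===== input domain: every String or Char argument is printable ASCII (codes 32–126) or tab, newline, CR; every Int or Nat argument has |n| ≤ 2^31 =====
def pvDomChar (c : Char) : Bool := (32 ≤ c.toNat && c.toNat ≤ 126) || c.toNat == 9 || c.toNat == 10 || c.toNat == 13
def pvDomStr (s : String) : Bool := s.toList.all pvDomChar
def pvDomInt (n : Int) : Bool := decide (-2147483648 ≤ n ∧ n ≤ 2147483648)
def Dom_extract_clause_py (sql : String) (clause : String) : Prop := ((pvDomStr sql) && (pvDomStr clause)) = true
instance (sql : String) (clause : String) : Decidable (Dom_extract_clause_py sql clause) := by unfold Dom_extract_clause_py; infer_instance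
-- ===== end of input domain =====

-- B replaces A's eight repeated sql.find scans (one per keyword, with a running minimum)
-- by a single left-to-right scan that stops at the first position where any other keyword
-- starts (objective: alternative). The try/except of both Pythons is dead code on str
-- inputs (nothing in the body can raise), so neither port carries it.

-- ===== PORT A =====
def extract_clause_py (sql : String) (clause : String) : String :=
  let allKeywords : List String :=
    ["select", "from", "join", "where", "group by", "having", "order by", "limit"]
  let idx := PySem.Str.find sql clause
  if idx = -1 then ""
  else
    let endv : Int := allKeywords.foldl
      (fun e kw =>
        if kw = clause then e
        else
          let pos := PySem.Str.findFrom sql kw (idx + PySem.Str.len clause)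
          if pos ≠ -1 ∧ pos < e then pos else e)
      (PySem.Str.len sql)
    PySem.Str.strip (PySem.Str.slice sql (some idx) (some endv))

-- ===== PORT B =====
-- the 'for p in range(start, len(sql)) … break' loop of Source B: walk the suffix, counter p
def pvScanB (kws : List String) (clause : String) : List Char → Nat → Nat
  | [], p => p
  | c :: rest, p =>
    if kws.any (fun kw => kw != clause && PySem.Chars.startswith (c :: rest) kw.toList) then p
    else pvScanB kws clause rest (p + 1)

def extract_clause_py_alt (sql : String) (clause : String) : String :=
  let allKeywords : List String :=
    ["select", "from", "join", "where", "group by", "having", "order by", "limit"]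
  let idx := PySem.Str.find sql clause
  if idx = -1 then ""
  else
    -- idx ≥ 0 here, so idx.toNat is exactly the Python int idx
    let start := idx.toNat + clause.toList.length
    let endv := pvScanB allKeywords clause (sql.toList.drop start) start
    PySem.Str.strip (PySem.Str.slice sql (some idx) (some (endv : Int)))

-- ===== PRECONDITION & SPEC =====
def Spec_extract_clause_py (sql : String) (clause : String) (out : String) : Prop := out = extract_clause_py_alt sql clause
instance (sql : String) (clause : String) (out : String) : Decidable (Spec_extract_clause_py sql clause out) := by unfold Spec_extract_clause_py; infer_instance

-- ===== CLAIM (what is proved, stated in full; the proofs are below) =====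
def Claim_equal_extract_clause_py : Prop := ∀ (sql : String) (clause : String), Dom_extract_clause_py sql clause → Spec_extract_clause_py sql clause (extract_clause_py sql clause)

-- ===== LEMMAS AND PROOFS =====

-- "some keyword other than clause starts here"
def pvHit (kws : List String) (clause : String) (t : List Char) : Prop :=
  ∃ kw ∈ kws, kw ≠ clause ∧ kw.toList <+: t

lemma pvScanB_spec (kws : List String) (clause : String) :
    ∀ (l : List Char) (p : Nat),
      p ≤ pvScanB kws clause l p ∧
      pvScanB kws clause l p ≤ p + l.length ∧
      (∀ q, p ≤ q → q < pvScanB kws clause l p → ¬ pvHit kws clause (l.drop (q - p))) ∧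
      (pvScanB kws clause l p < p + l.length →
        pvHit kws clause (l.drop (pvScanB kws clause l p - p))) := by
  intro l
  induction l with
  | nil =>
    intro p
    simp [pvScanB]
    omega
  | cons c rest ih =>
    intro p
    by_cases h : (kws.any (fun kw => kw != clause && PySem.Chars.startswith (c :: rest) kw.toList)) = true
    · have hr : pvScanB kws clause (c :: rest) p = p := by simp [pvScanB, h]
      rw [hr]
      refine ⟨le_refl _, by simp, fun q hq1 hq2 => absurd (lt_of_le_of_lt hq1 hq2) (lt_irrefl p), fun _ => ?_⟩
      simp only [Nat.sub_self, List.drop_zero]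
      rcases List.any_eq_true.mp h with ⟨kw, hkw, hcond⟩
      rcases (Bool.and_eq_true _ _).mp hcond with ⟨hne, hsw⟩
      exact ⟨kw, hkw, by simpa using hne, (PySem.Chars.startswith_iff _ _).mp hsw⟩
    · have hr : pvScanB kws clause (c :: rest) p = pvScanB kws clause rest (p + 1) := by
        simp [pvScanB, h]
      obtain ⟨ih1, ih2, ih3, ih4⟩ := ih (p + 1)
      rw [hr]
      refine ⟨by omega, by simp; omega, ?_, ?_⟩
      · intro q hq1 hq2
        by_cases hqp : q = p
        · subst hqp
          simp only [Nat.sub_self, List.drop_zero]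
          rintro ⟨kw, hkw, hne, hpre⟩
          apply h
          exact List.any_eq_true.mpr ⟨kw, hkw, by
            simp [hne, (PySem.Chars.startswith_iff _ _).mpr hpre]⟩
        · have hq1' : p + 1 ≤ q := by omega
          have := ih3 q hq1' hq2
          have hdrop : (c :: rest).drop (q - p) = rest.drop (q - (p + 1)) := by
            have : q - p = (q - (p + 1)) + 1 := by omega
            rw [this]; simp [List.drop_succ_cons]
          rw [hdrop]; exact this
      · intro hlt
        have hlt' : pvScanB kws clause rest (p + 1) < p + 1 + rest.length := by
          simp at hlt; omega
        have := ih4 hlt'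
        have hdrop : (c :: rest).drop (pvScanB kws clause rest (p + 1) - p)
            = rest.drop (pvScanB kws clause rest (p + 1) - (p + 1)) := by
          have h1 : p + 1 ≤ pvScanB kws clause rest (p + 1) := ih1
          have : pvScanB kws clause rest (p + 1) - p
              = (pvScanB kws clause rest (p + 1) - (p + 1)) + 1 := by omega
          rw [this]; simp [List.drop_succ_cons]
        rw [hdrop]; exact this

lemma pvFold_spec (f : String → Int) (clause : String) :
    ∀ (L : List String) (e : Int),
      (L.foldl (fun e kw => if kw = clause then e
          else if f kw ≠ -1 ∧ f kw < e then f kw else e) e) ≤ e ∧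
      ((L.foldl (fun e kw => if kw = clause then e
          else if f kw ≠ -1 ∧ f kw < e then f kw else e) e) = e ∨
        ∃ kw ∈ L, kw ≠ clause ∧ f kw ≠ -1 ∧
          (L.foldl (fun e kw => if kw = clause then e
            else if f kw ≠ -1 ∧ f kw < e then f kw else e) e) = f kw) ∧
      (∀ kw ∈ L, kw ≠ clause → f kw ≠ -1 →
        (L.foldl (fun e kw => if kw = clause then e
          else if f kw ≠ -1 ∧ f kw < e then f kw else e) e) ≤ f kw) := by
  intro L
  induction L with
  | nil => intro e; simp
  | cons kw0 L' ih =>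
    intro e
    set e' : Int := if kw0 = clause then e else if f kw0 ≠ -1 ∧ f kw0 < e then f kw0 else e with he'
    have hstep : ((kw0 :: L').foldl (fun e kw => if kw = clause then e
        else if f kw ≠ -1 ∧ f kw < e then f kw else e) e)
        = (L'.foldl (fun e kw => if kw = clause then e
        else if f kw ≠ -1 ∧ f kw < e then f kw else e) e') := by
      simp [List.foldl_cons, he']
    obtain ⟨ih1, ih2, ih3⟩ := ih e'
    have he'le : e' ≤ e := by
      rw [he']; split_ifs with h1 h2 <;> try rfl
      · exact le_of_lt h2.2
    rw [hstep]
    refine ⟨le_trans ih1 he'le, ?_, ?_⟩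
    · have he'cases : e' = e ∨ (kw0 ≠ clause ∧ f kw0 ≠ -1 ∧ e' = f kw0) := by
        rw [he']; split_ifs with h1 h2
        · exact Or.inl rfl
        · exact Or.inr ⟨h1, h2.1, rfl⟩
        · exact Or.inl rfl
      rcases ih2 with h | ⟨kw, hkw, hne, hf, heq⟩
      · rcases he'cases with hee | ⟨hne0, hf0, hee⟩
        · exact Or.inl (h.trans hee)
        · exact Or.inr ⟨kw0, List.mem_cons_self, hne0, hf0, h.trans hee⟩
      · exact Or.inr ⟨kw, List.mem_cons_of_mem _ hkw, hne, hf, heq⟩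
    · intro kw hkw hne hf
      rcases List.mem_cons.mp hkw with h | h
      · subst h
        have : e' ≤ f kw := by
          rw [he']
          split_ifs with h1 h2
          · exact absurd h1 hne
          · exact le_refl _
          · push Not at h2; exact h2 hf
        exact le_trans ih1 this
      · exact ih3 kw h hne hf

-- the heart: min over keywords of the first occurrence ≥ st  =  first position ≥ st where any keyword starts
lemma pvFold_eq_scan (cs : List Char) (clause : String) (L : List String) (st : Nat)
    (hst : st ≤ cs.length) :
    (L.foldl (fun e kw => if kw = clause then e
        else if PySem.Chars.findFrom cs kw.toList (st : Int) ≠ -1 ∧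
                PySem.Chars.findFrom cs kw.toList (st : Int) < e
          then PySem.Chars.findFrom cs kw.toList (st : Int) else e)
      (cs.length : Int)) = (pvScanB L clause (cs.drop st) st : Int) := by
  set f : String → Int := fun kw => PySem.Chars.findFrom cs kw.toList (st : Int) with hf
  obtain ⟨h1, h2, h3⟩ := pvFold_spec f clause L (cs.length : Int)
  obtain ⟨s1, s2, s3, s4⟩ := pvScanB_spec L clause (cs.drop st) st
  set rA : Int := L.foldl (fun e kw => if kw = clause then e
        else if f kw ≠ -1 ∧ f kw < e then f kw else e) (cs.length : Int) with hrA
  set rB : Nat := pvScanB L clause (cs.drop st) st with hrB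
  have hdroplen : (cs.drop st).length = cs.length - st := List.length_drop
  have s2' : rB ≤ cs.length := by omega
  have hdrop : ∀ q : Nat, st ≤ q → (cs.drop st).drop (q - st) = cs.drop q := by
    intro q hq
    rw [List.drop_drop]
    congr 1
    omega
  have hle1 : rA ≤ (rB : Int) := by
    by_cases hrb : rB < st + (cs.drop st).length
    · obtain ⟨kw, hkw, hne, hpre⟩ := s4 hrb
      rw [hdrop rB s1] at hpre
      have hfne : f kw ≠ -1 := by
        rw [hf]
        intro hcon
        have := (PySem.Chars.findFrom_natCast_eq_neg_one_iff cs kw.toList st hst).mp hcon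
        apply this
        have hsuf : cs.drop rB <:+: cs.drop st := by
          rw [← hdrop rB s1]
          exact (List.drop_suffix _ _).isInfix
        exact hpre.isInfix.trans hsuf
      obtain ⟨hk1, hk2, hk3⟩ := PySem.Chars.findFrom_natCast_spec cs kw.toList st hst hfne
      have ht : (PySem.Chars.findFrom cs kw.toList (st : Int)).toNat ≤ rB := by
        by_contra hcon
        exact hk3 rB s1 (by omega) hpre
      have ht' : (f kw).toNat ≤ rB := ht
      have h0 : (0 : Int) ≤ f kw := le_trans (by positivity) hk1
      have hfb : f kw ≤ (rB : Int) := by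
        rw [← Int.toNat_of_nonneg h0]
        exact_mod_cast ht'
      exact le_trans (h3 kw hkw hne hfne) hfb
    · have : rB = st + (cs.drop st).length := by omega
      have hn : rB = cs.length := by omega
      rw [hn]
      exact h1
  have hle2 : (rB : Int) ≤ rA := by
    rcases h2 with h | ⟨kw, hkw, hne, hfne, heq⟩
    · rw [h]
      exact_mod_cast s2'
    · obtain ⟨hk1, hk2, hk3⟩ := PySem.Chars.findFrom_natCast_spec cs kw.toList st hst hfne
      have h0 : (0 : Int) ≤ f kw := le_trans (by positivity) hk1
      have hstle : st ≤ (PySem.Chars.findFrom cs kw.toList (st : Int)).toNat := by omega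
      have hrle : rB ≤ (PySem.Chars.findFrom cs kw.toList (st : Int)).toNat := by
        by_contra hcon
        apply s3 (PySem.Chars.findFrom cs kw.toList (st : Int)).toNat hstle (by omega)
        rw [hdrop _ hstle]
        exact ⟨kw, hkw, hne, hk2⟩
      have hrle' : rB ≤ (f kw).toNat := hrle
      rw [heq, ← Int.toNat_of_nonneg h0]
      exact_mod_cast hrle'
  exact le_antisymm hle1 hle2

theorem extract_clause_py_spec_aux (sql : String) (clause : String) :
    extract_clause_py sql clause = extract_clause_py_alt sql clause := by
  unfold extract_clause_py extract_clause_py_alt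
  by_cases hidx : PySem.Str.find sql clause = -1
  · rw [if_pos hidx, if_pos hidx]
  · rw [if_neg hidx, if_neg hidx]
    have h0 : (0 : Int) ≤ PySem.Str.find sql clause := by
      have h1 : (-1 : Int) ≤ PySem.Chars.find sql.toList clause.toList :=
        PySem.Chars.neg_one_le_find sql.toList clause.toList
      have he : PySem.Str.find sql clause = PySem.Chars.find sql.toList clause.toList := by
        simp
      rw [he] at hidx ⊢
      omega
    set idx := PySem.Str.find sql clause with hidxdef
    have he : idx = PySem.Chars.find sql.toList clause.toList := by simp [hidxdef]
    have hspec := PySem.Chars.find_spec (s := sql.toList) (sub := clause.toList) (by rw [← he]; exact h0)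
    have hlelen := PySem.Chars.find_le_length sql.toList clause.toList
    have hprelen : clause.toList.length ≤ (sql.toList.drop idx.toNat).length := by
      rw [he]
      exact hspec.1.length_le
    have hst : idx.toNat + clause.toList.length ≤ sql.toList.length := by
      rw [List.length_drop] at hprelen
      rw [← he] at hlelen
      omega
    have harg : idx + PySem.Str.len clause = ((idx.toNat + clause.toList.length : Nat) : Int) := by
      have hl : PySem.Str.len clause = (clause.toList.length : Int) := by
        simp [PySem.Str.len]
      rw [hl]
      push_cast
      omega
    have hlen : PySem.Str.len sql = (sql.toList.length : Int) := by
      simp [PySem.Str.len]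
    rw [harg, hlen]
    simp only [PySem.Str.findFrom_eq]
    rw [pvFold_eq_scan sql.toList clause
      ["select", "from", "join", "where", "group by", "having", "order by", "limit"]
      (idx.toNat + clause.toList.length) hst]

-- ===== VERDICT (by name: the statement is the Claim_ definition above) =====
theorem extract_clause_py_spec : Claim_equal_extract_clause_py := by
  intro sql clause _
  exact extract_clause_py_spec_aux sql clause
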